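-- pv_equiv track=rewrite | github.com/mspzh/2017-preproc-ling-dann | project.py | articles
-- ===== SOURCE A (Python) =====
-- def articles(src):
--     entry = []
--     for line in src:
--         line = line.strip()
--         if (line == ''):
--             yield entry
--             entry = []
--         else:
--             [tag, *data] = line.split(' ', 1)
--             entry.append((tag, data[0] if data else ''))
--     yield entry
-- ===== SOURCE B (Python) =====
-- def _parse(line):
--     parts = line.split(' ', 1)
--     return (parts[0], parts[1] if len(parts) > 1 else '')
--
-- def articles(src):
--     stripped = [line.strip() for line in src]
--     groups = [[]]
--     for line in stripped:
--         if line == '':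
--             groups.append([])
--         else:
--             groups[-1].append(line)
--     for group in groups:
--         yield [_parse(line) for line in group]
-- ===== Notes on version B (the rewrite author's own statement) =====
-- stated objective: alternative
-- what changed: B separates the phases: it strips all lines, recursively splits the list into groups at blank lines (keeping empty groups), and only then parses each group's lines into (tag, rest) pairs, instead of A's single left-to-right pass with a mutable current-entry accumulator.
import Mathlib
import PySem

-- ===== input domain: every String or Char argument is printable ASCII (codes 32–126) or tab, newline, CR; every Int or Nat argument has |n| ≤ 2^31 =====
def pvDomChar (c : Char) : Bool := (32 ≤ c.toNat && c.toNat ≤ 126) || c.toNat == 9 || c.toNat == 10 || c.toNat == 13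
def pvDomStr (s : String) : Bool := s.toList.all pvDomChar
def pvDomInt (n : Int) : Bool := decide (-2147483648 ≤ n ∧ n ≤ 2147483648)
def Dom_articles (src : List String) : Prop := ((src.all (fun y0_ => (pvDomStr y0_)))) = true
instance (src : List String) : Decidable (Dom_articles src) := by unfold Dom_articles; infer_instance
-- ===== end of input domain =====

-- B re-decomposes A's single accumulating pass into phases: strip, recursively group at blank
-- lines (keeping empty groups), then parse each group's lines — an alternative of the same cost.

-- ===== PORT A =====
-- one fold step = one iteration of A's for-loop over (yielded-so-far, current entry)
def pvStepA (st : List (List (String × String)) × List (String × String)) (rawline : String) :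
    List (List (String × String)) × List (String × String) :=
  let line := PySem.Str.strip rawline
  if line = "" then (st.1 ++ [st.2], [])
  else
    -- [tag, *data] = line.split(' ', 1); entry.append((tag, data[0] if data else ''))
    let parts := (PySem.Str.splitMax? line " " 1).getD []
    (st.1, st.2 ++ [(parts.headD "", parts.tail.headD "")])

def articles (src : List String) : List (List (String × String)) :=
  let st := src.foldl pvStepA ([], [])
  st.1 ++ [st.2]

-- ===== PORT B =====
-- _parse: parts = line.split(' ', 1); (parts[0], parts[1] if len(parts) > 1 else '')
def pvParse (line : String) : String × String :=
  let parts := (PySem.Str.splitMax? line " " 1).getD []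
  (parts.headD "", if 1 < parts.length then parts.getD 1 "" else "")

-- grouping pass: groups.append([]) on a blank line, else groups[-1].append(line)
def pvGStep (gs : List (List String)) (line : String) : List (List String) :=
  if line = "" then gs ++ [[]]
  else gs.dropLast ++ [gs.getLastD [] ++ [line]]

def articles_alt (src : List String) : List (List (String × String)) :=
  ((src.map PySem.Str.strip).foldl pvGStep [[]]).map (fun g => g.map pvParse)

-- ===== PRECONDITION & SPEC =====
def Spec_articles (src : List String) (out : List (List (String × String))) : Prop := out = articles_alt src
instance (src : List String) (out : List (List (String × String))) : Decidable (Spec_articles src out) := by unfold Spec_articles; infer_instance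

-- ===== CLAIM (what is proved, stated in full; the proofs are below) =====
def Claim_equal_articles : Prop := ∀ (src : List String), Dom_articles src → Spec_articles src (articles src)

-- ===== LEMMAS AND PROOFS =====

lemma pvParse_eq (line : String) :
    (((((PySem.Str.splitMax? line " " 1).getD []).headD "" : String),
      (((PySem.Str.splitMax? line " " 1).getD []).tail.headD "" : String)) : String × String)
    = pvParse line := by
  unfold pvParse
  cases h : (PySem.Str.splitMax? line " " 1).getD [] with
  | nil => simp
  | cons a t => cases t <;> simp

lemma map_drop_last {α β : Type} (f : List α → β) : ∀ (gs : List (List α)), gs ≠ [] →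
    gs.map f = (gs.dropLast).map f ++ [f (gs.getLastD [])] := by
  intro gs
  induction gs with
  | nil => simp
  | cons a t ih =>
    intro _
    cases t with
    | nil => rfl
    | cons b u =>
      have h := ih (by simp)
      simp only [List.getLastD_cons] at h ⊢
      rw [List.dropLast_cons_of_ne_nil (by simp), List.map_cons, h]
      simp

lemma pvRun (ls : List String) : ∀ (gs : List (List String)), gs ≠ [] →
    (let st := ls.foldl pvStepA ((gs.dropLast).map (List.map pvParse), (gs.getLastD []).map pvParse)
     st.1 ++ [st.2]) =
    ((ls.map PySem.Str.strip).foldl pvGStep gs).map (List.map pvParse) := by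
  induction ls with
  | nil =>
    intro gs h
    simpa using (map_drop_last (List.map pvParse) gs h).symm
  | cons l ls ih =>
    intro gs h
    simp only [List.foldl_cons, List.map_cons, pvStepA, pvGStep]
    by_cases hl : PySem.Str.strip l = ""
    · rw [hl]
      rw [if_pos rfl, if_pos rfl]
      have h3 := ih (gs ++ [[]]) (by simp)
      rw [List.dropLast_concat, List.getLastD_concat] at h3
      rw [← map_drop_last (List.map pvParse) gs h]
      simpa using h3
    · rw [if_neg hl, if_neg hl]
      have h3 := ih (gs.dropLast ++ [gs.getLastD [] ++ [PySem.Str.strip l]]) (by simp)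
      rw [List.dropLast_concat, List.getLastD_concat, List.map_append] at h3
      rw [pvParse_eq (PySem.Str.strip l)]
      simpa using h3

-- ===== VERDICT (by name: the statement is the Claim_ definition above) =====
theorem articles_spec : Claim_equal_articles := by
  intro src _
  unfold Spec_articles articles articles_alt
  simpa using pvRun src [[]] (by simp)
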